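-- pv_equiv track=rewrite | github.com/cjfal2/aLGoRiTHM | 백준/Gold/12851. 숨바꼭질 2/숨바꼭질 2.py | bfs
-- ===== SOURCE A (Python) =====
-- from collections import deque
--
-- def bfs(N, K):
--     visited = set()
--     q = deque([(N, 0)])
--     cnt = 0
--     min_time = 1000000
--
--     while q:
--         position, now = q.popleft()
--         visited.add(position)
--
--         if now > min_time:  # 이미 최소 시간을 넘어간 경우
--             continue
--
--         if position == K:  # 동생을 찾은 경우
--             if now < min_time:
--                 min_time = now
--                 cnt = 1
--             elif now == min_time:
--                 cnt += 1
--             continue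
--
--         next_positions = [position - 1, position + 1, position * 2]
--         for next_pos in next_positions:
--             if 0 <= next_pos <= 100000 and next_pos not in visited:
--                 q.append((next_pos, now + 1))
--
--     return min_time, cnt
-- ===== SOURCE B (Python) =====
-- def bfs(N, K):
--     cur = [N]
--     visited = set()
--     d = 0
--     while cur:
--         c = cur.count(K)
--         if c:
--             return d, c
--         nxt = []
--         for p in cur:
--             visited.add(p)
--             for v in (p - 1, p + 1, p * 2):
--                 if 0 <= v <= 100000 and v not in visited:
--                     nxt.append(v)
--         cur = nxt
--         d += 1
--     return 1000000, 0
-- ===== Notes on version B (the rewrite author's own statement) =====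
-- stated objective: simpler
-- what changed: Replaces A's timed-entry deque with its running min_time/cnt accumulator and depth-pruning branch by an untimed level-by-level frontier BFS that simply returns (level, cur.count(K)) at the first level containing K, instead of tagging every entry with a time and draining a whole extra pruned level after the answer is known.
import Mathlib
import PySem

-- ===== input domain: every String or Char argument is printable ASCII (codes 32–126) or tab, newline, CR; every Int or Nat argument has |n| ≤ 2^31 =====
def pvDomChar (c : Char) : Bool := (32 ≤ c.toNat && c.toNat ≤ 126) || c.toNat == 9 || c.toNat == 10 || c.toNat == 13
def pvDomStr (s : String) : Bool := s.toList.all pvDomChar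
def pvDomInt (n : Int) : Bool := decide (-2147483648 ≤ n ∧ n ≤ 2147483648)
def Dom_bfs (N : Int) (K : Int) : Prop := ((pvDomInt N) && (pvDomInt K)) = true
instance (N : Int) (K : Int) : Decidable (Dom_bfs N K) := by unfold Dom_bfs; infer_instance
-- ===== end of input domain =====

-- B keeps A's exact visit rule but drops the timed deque, the min_time/cnt state machine and the
-- pruning pass, counting K in the first frontier level that contains it (return value only; no mutation).
-- Python's O(1) set and deque are ported as Std.TreeSet and a two-list queue (exact same contents).

-- ===== PORT A =====
-- the inner 'for next_pos in next_positions' append loop of A (entries tagged with time now+1)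
def nextsA (visited : Std.TreeSet Int) (position : Int) (now : Int) : List (Int × Int) :=
  ([position - 1, position + 1, position * 2].filter
    (fun v => decide (0 ≤ v) && decide (v ≤ 100000) && !(visited.contains v))).map
    (fun v => (v, now + 1))

-- deque.popleft() on a two-list queue: front holds the head, back holds the appends in reverse
def dequeue (front back : List (Int × Int)) :
    Option ((Int × Int) × List (Int × Int) × List (Int × Int)) :=
  match front with
  | e :: f => some (e, f, back)
  | [] =>
    match back.reverse with
    | [] => none
    | e :: f => some (e, f, [])

-- A's 'while q' loop; the fuel only makes the recursion structural — the proofs below show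
-- 4 ^ 100010 is never exhausted, so every step is exactly one popleft of A
def loopA (K : Int) : Nat → List (Int × Int) → List (Int × Int) → Std.TreeSet Int → Int → Int → Int × Int
  | 0, _, _, _, min_time, cnt => (min_time, cnt)
  | fuel + 1, front, back, visited, min_time, cnt =>
    match dequeue front back with
    | none => (min_time, cnt)
    | some ((position, now), front', back') =>
      let visited' := visited.insert position
      if now > min_time then
        loopA K fuel front' back' visited' min_time cnt
      else if position = K then
        if now < min_time then loopA K fuel front' back' visited' now 1
        else if now = min_time then loopA K fuel front' back' visited' min_time (cnt + 1)
        else loopA K fuel front' back' visited' min_time cnt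
      else
        -- q.append(...) for each generated entry, in order
        loopA K fuel front' ((nextsA visited' position now).reverse ++ back') visited' min_time cnt

def bfs (N : Int) (K : Int) : Int × Int :=
  loopA K (4 ^ 100010) [(N, 0)] [] Std.TreeSet.empty 1000000 0

-- ===== PORT B =====
-- the inner 'for v in (p-1, p+1, p*2)' loop of B
def nextsB (visited : Std.TreeSet Int) (p : Int) : List Int :=
  [p - 1, p + 1, p * 2].filter
    (fun v => decide (0 ≤ v) && decide (v ≤ 100000) && !(visited.contains v))

-- B's 'for p in cur' loop building nxt by appends (reversed accumulator, same list) while marking visited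
def expandB (cur : List Int) (visited : Std.TreeSet Int) : List Int × Std.TreeSet Int :=
  let r := cur.foldl (fun acc p =>
    ((nextsB (acc.2.insert p) p).reverse ++ acc.1, acc.2.insert p)) ([], visited)
  (r.1.reverse, r.2)

-- B's 'while cur' loop, one recursive step per level (fuel 100010 is never exhausted, proved below)
def loopB (K : Int) : Nat → List Int → Std.TreeSet Int → Int → Int × Int
  | 0, _, _, _ => (1000000, 0)
  | _ + 1, [], _, _ => (1000000, 0)
  | fuel + 1, p :: cur, visited, d =>
    let c : Int := (PySem.List.count (p :: cur) K : Int)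
    if c ≠ 0 then (d, c)
    else
      let s := expandB (p :: cur) visited
      loopB K fuel s.1 s.2 (d + 1)

def bfs_alt (N : Int) (K : Int) : Int × Int :=
  loopB K 100010 [N] Std.TreeSet.empty 0

-- ===== PRECONDITION & SPEC =====
def Spec_bfs (N : Int) (K : Int) (out : Int × Int) : Prop := out = bfs_alt N K
instance (N : Int) (K : Int) (out : Int × Int) : Decidable (Spec_bfs N K out) := by unfold Spec_bfs; infer_instance

-- ===== CLAIM (what is proved, stated in full; the proofs are below) =====
def Claim_equal_bfs : Prop := ∀ (N : Int) (K : Int), Dom_bfs N K → Spec_bfs N K (bfs N K)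

-- ===== LEMMAS AND PROOFS =====

-- every position a BFS state can ever hold: the start N and 0..100000
def SL (N : Int) : List Int := N :: List.map Int.ofNat (List.range 100001)

-- depth invariant of one queued/frontier position x at depth t against the visited set
def InvEnt (V : Std.TreeSet Int) (t : Int) (x : Int) : Prop :=
  (x ∈ V → t ≤ (V.size : Int)) ∧ (x ∉ V → t ≤ (V.size : Int) + 1)

theorem size_insert_eq (V : Std.TreeSet Int) (p : Int) :
    (V.insert p).size = if p ∈ V then V.size else V.size + 1 := by
  rw [Std.TreeSet.size_insert]
  by_cases h : p ∈ V
  · rw [if_pos (Std.TreeSet.mem_iff_contains.mp h), if_pos h]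
  · rw [if_neg (fun hc => h (Std.TreeSet.mem_iff_contains.mpr hc)), if_neg h]

theorem mem_insert_iff (V : Std.TreeSet Int) (p x : Int) :
    x ∈ V.insert p ↔ x = p ∨ x ∈ V := by
  rw [Std.TreeSet.mem_insert]
  constructor
  · rintro (h | h)
    · exact Or.inl (Std.LawfulEqCmp.compare_eq_iff_eq.mp h).symm
    · exact Or.inr h
  · rintro (h | h)
    · exact Or.inl (Std.LawfulEqCmp.compare_eq_iff_eq.mpr h.symm)
    · exact Or.inr h

theorem invEnt_mono_insert (V : Std.TreeSet Int) (p t x : Int)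
    (h : InvEnt V t x) : InvEnt (V.insert p) t x := by
  obtain ⟨h1, h2⟩ := h
  constructor <;> intro hx <;> rw [mem_insert_iff] at * <;> rw [size_insert_eq] <;> split_ifs with hv
  · rcases hx with hx | hx
    · subst hx; exact h1 hv
    · exact h1 hx
  · rcases hx with hx | hx
    · subst hx; exact h2 hv
    · exact le_trans (h1 hx) (by omega)
  · exact le_trans (h2 (fun hc => hx (Or.inr hc))) (by omega)
  · exact le_trans (h2 (fun hc => hx (Or.inr hc))) (by omega)

theorem mem_SL (v : Int) (h0 : 0 ≤ v) (h1 : v ≤ 100000) (N : Int) : v ∈ SL N := by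
  unfold SL
  refine List.mem_cons_of_mem _ (List.mem_map.mpr ⟨v.toNat, List.mem_range.mpr ?_, ?_⟩)
  · omega
  · simp [Int.ofNat_toNat]; omega

theorem lenV_le (N : Int) (V : Std.TreeSet Int)
    (hsub : ∀ x ∈ V, x ∈ SL N) : V.size ≤ 100002 := by
  have hnd : V.toList.Nodup :=
    (Std.TreeSet.distinct_toList (t := V)).imp
      (fun hab heq => hab (Std.LawfulEqCmp.compare_eq_iff_eq.mpr heq))
  have h1 : V.toList.toFinset.card = V.toList.length := List.toFinset_card_of_nodup hnd
  have h2 : V.toList.toFinset ⊆ (SL N).toFinset := by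
    intro x hx; rw [List.mem_toFinset] at *
    exact hsub x (Std.TreeSet.mem_toList.mp hx)
  have h3 := Finset.card_le_card h2
  have h4 : (SL N).toFinset.card ≤ (SL N).length := List.toFinset_card_le _
  have h5 : (SL N).length = 100002 := by
    unfold SL
    rw [List.length_cons, List.length_map, List.length_range]
  have h6 : V.toList.length = V.size := Std.TreeSet.length_toList
  omega

theorem nextsA_eq_map (visited : Std.TreeSet Int) (p now : Int) :
    nextsA visited p now = (nextsB visited p).map (fun v => (v, now + 1)) := rfl

theorem length_nextsB_le (visited : Std.TreeSet Int) (p : Int) :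
    (nextsB visited p).length ≤ 3 := by
  have := List.length_filter_le
    (fun v => decide (0 ≤ v) && decide (v ≤ 100000) && !(visited.contains v))
    [p - 1, p + 1, p * 2]
  simpa [nextsB] using this

theorem mem_nextsB (visited : Std.TreeSet Int) (p r : Int) (h : r ∈ nextsB visited p) :
    0 ≤ r ∧ r ≤ 100000 ∧ r ∉ visited := by
  rw [nextsB, List.mem_filter] at h
  obtain ⟨-, h2⟩ := h
  simp only [Bool.and_eq_true, decide_eq_true_eq, Bool.not_eq_true'] at h2
  refine ⟨h2.1.1, h2.1.2, fun hm => ?_⟩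
  rw [Std.TreeSet.mem_iff_contains.mp hm] at h2
  exact absurd h2.2 (by simp)

theorem foldExpand_rev (cur : List Int) (acc0 : List Int) (visited : Std.TreeSet Int) :
    cur.foldl (fun acc p =>
      ((nextsB (acc.2.insert p) p).reverse ++ acc.1, acc.2.insert p)) (acc0, visited)
    = ((expandB cur visited).1.reverse ++ acc0, (expandB cur visited).2) := by
  induction cur generalizing acc0 visited with
  | nil => simp [expandB]
  | cons p cur ih =>
    simp only [expandB, List.foldl_cons, List.append_nil]
    rw [ih, ih ((nextsB (visited.insert p) p).reverse)]
    simp only [expandB, List.reverse_append, List.reverse_reverse]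
    rw [List.append_assoc]

theorem expandB_cons (p : Int) (cur : List Int) (visited : Std.TreeSet Int) :
    expandB (p :: cur) visited
      = (nextsB (visited.insert p) p ++ (expandB cur (visited.insert p)).1,
         (expandB cur (visited.insert p)).2) := by
  have h := foldExpand_rev cur ((nextsB (visited.insert p) p).reverse) (visited.insert p)
  simp only [expandB, List.foldl_cons, List.append_nil]
  rw [h]
  simp [expandB, List.reverse_append]

theorem length_expandB (cur : List Int) (visited : Std.TreeSet Int) :
    (expandB cur visited).1.length ≤ 3 * cur.length := by
  induction cur generalizing visited with
  | nil => simp [expandB]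
  | cons p cur ih =>
    rw [expandB_cons]
    have h1 := length_nextsB_le (visited.insert p) p
    have h2 := ih (visited.insert p)
    simp only [List.length_append, List.length_cons]
    omega

theorem mem_expandB_fst (cur : List Int) (visited : Std.TreeSet Int) (r : Int)
    (h : r ∈ (expandB cur visited).1) : 0 ≤ r ∧ r ≤ 100000 := by
  induction cur generalizing visited with
  | nil => simp [expandB] at h
  | cons p cur ih =>
    rw [expandB_cons] at h
    rcases List.mem_append.mp h with h | h
    · exact ⟨(mem_nextsB _ _ _ h).1, (mem_nextsB _ _ _ h).2.1⟩
    · exact ih _ h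

theorem invEnt_mono_expandB (cur : List Int) (V : Std.TreeSet Int) (t x : Int)
    (h : InvEnt V t x) : InvEnt (expandB cur V).2 t x := by
  induction cur generalizing V with
  | nil => simpa [expandB]
  | cons p cur ih =>
    rw [expandB_cons]
    exact ih _ (invEnt_mono_insert _ _ _ _ h)

theorem expandB_inv (N : Int) (d : Int) :
    ∀ (cur : List Int) (visited : Std.TreeSet Int),
    (∀ p ∈ cur, InvEnt visited d p) →
    (∀ x ∈ visited, x ∈ SL N) → (∀ p ∈ cur, p ∈ SL N) →
    (∀ r ∈ (expandB cur visited).1, InvEnt (expandB cur visited).2 (d + 1) r) ∧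
    (∀ x ∈ (expandB cur visited).2, x ∈ SL N) := by
  intro cur
  induction cur with
  | nil =>
    intro visited _ hvs _
    exact ⟨by simp [expandB], by simpa [expandB] using hvs⟩
  | cons p cur ih =>
    intro visited hcur hvs hcs
    have hp := hcur p (List.mem_cons_self)
    have hvis' : ∀ x ∈ visited.insert p, x ∈ SL N := by
      intro x hx
      rcases (mem_insert_iff _ _ _).mp hx with hx | hx
      · rw [hx]; exact hcs p List.mem_cons_self
      · exact hvs x hx
    have hcur' : ∀ q ∈ cur, InvEnt (visited.insert p) d q := fun q hq =>
      invEnt_mono_insert _ _ _ _ (hcur q (List.mem_cons_of_mem _ hq))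
    have hcs' : ∀ q ∈ cur, q ∈ SL N := fun q hq => hcs q (List.mem_cons_of_mem _ hq)
    obtain ⟨ih1, ih2⟩ := ih (visited.insert p) hcur' hvis' hcs'
    rw [expandB_cons]
    refine ⟨?_, ih2⟩
    intro r hr
    rcases List.mem_append.mp hr with hr | hr
    · obtain ⟨h0, h1, hnm⟩ := mem_nextsB _ _ _ hr
      have hbase : InvEnt (visited.insert p) (d + 1) r := by
        constructor
        · intro hmem; exact absurd hmem hnm
        · intro _
          rw [size_insert_eq]
          split_ifs with hv
          · have := hp.1 hv; omega
          · have := hp.2 hv; omega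
      exact invEnt_mono_expandB _ _ _ _ hbase
    · exact ih1 r hr

-- an emptied front is refilled from the reversed back: the two queue shapes run identically
theorem loopA_flip (K : Int) (fuel : Nat) (back : List (Int × Int))
    (visited : Std.TreeSet Int) (m c : Int) :
    loopA K fuel [] back visited m c = loopA K fuel back.reverse [] visited m c := by
  cases fuel with
  | zero => rfl
  | succ f =>
    rw [loopA, loopA]
    cases h : back.reverse with
    | nil => simp [dequeue, h]
    | cons e rest => simp [dequeue, h]

-- with min_time = d fixed, a whole level of depth-(d+1) entries is pruned away one pop at a time
theorem drainA (K d c : Int) :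
    ∀ (junk : List Int) (fuel : Nat) (visited : Std.TreeSet Int), junk.length ≤ fuel →
    loopA K fuel (junk.map (fun r => (r, d + 1))) [] visited d c = (d, c) := by
  intro junk
  induction junk with
  | nil =>
    intro fuel visited _
    cases fuel <;> simp [loopA, dequeue]
  | cons r junk ih =>
    intro fuel visited h
    cases fuel with
    | zero => simp at h
    | succ f =>
      simp only [List.map_cons]
      rw [loopA]
      simp only [dequeue]
      rw [if_pos (by omega : d + 1 > d)]
      exact ih f _ (by simp at h ⊢; omega)

-- after the first pop of K (min_time = d): the rest of the level only adds K's multiplicity to cnt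
theorem foundA_rest (K d : Int) :
    ∀ (cur : List Int), ∀ (junk : List Int) (fuel : Nat) (visited : Std.TreeSet Int) (c : Int),
    4 * cur.length + junk.length ≤ fuel →
    loopA K fuel (cur.map (fun p => (p, d))) ((junk.map (fun r => (r, d + 1))).reverse) visited d c
      = (d, c + (cur.count K : Int)) := by
  intro cur
  induction cur with
  | nil =>
    intro junk fuel visited c h
    simp only [List.map_nil, List.count_nil, Nat.cast_zero, add_zero]
    rw [loopA_flip, List.reverse_reverse]
    exact drainA K d c junk fuel visited (by simp at h; omega)
  | cons p cur ih =>
    intro junk fuel visited c h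
    cases fuel with
    | zero => simp at h
    | succ f =>
      simp only [List.map_cons]
      rw [loopA]
      simp only [dequeue]
      rw [if_neg (by omega : ¬ d > d)]
      by_cases hpK : p = K
      · rw [if_pos hpK, if_neg (by omega : ¬ d < d)]
        simp only [if_true]
        rw [ih junk f _ (c + 1) (by simp at h ⊢; omega)]
        simp only [Prod.mk.injEq, true_and]
        rw [hpK, List.count_cons_self]
        push_cast; ring
      · rw [if_neg hpK]
        rw [nextsA_eq_map,
          show ((nextsB (visited.insert p) p).map (fun v => (v, d + 1))).reverse
              ++ ((junk.map (fun r => (r, d + 1))).reverse)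
            = (((junk ++ nextsB (visited.insert p) p).map (fun r => (r, d + 1))).reverse) by
            rw [List.map_append, List.reverse_append]]
        rw [ih (junk ++ nextsB (visited.insert p) p) f _ c
          (by have h3 := length_nextsB_le (visited.insert p) p
              simp only [List.length_append, List.length_cons] at h ⊢; omega)]
        rw [List.count_cons_of_ne (fun hc' => hpK hc')]

-- the level that contains K yields exactly (d, multiplicity of K in the level)
theorem foundA (K d : Int) (hd0 : 0 ≤ d) (hd : d < 1000000) :
    ∀ (cur : List Int), ∀ (junk : List Int) (fuel : Nat) (visited : Std.TreeSet Int),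
    0 < cur.count K → 4 * cur.length + junk.length ≤ fuel →
    loopA K fuel (cur.map (fun p => (p, d))) ((junk.map (fun r => (r, d + 1))).reverse) visited 1000000 0
      = (d, (cur.count K : Int)) := by
  intro cur
  induction cur with
  | nil => intro junk fuel visited hc _; simp at hc
  | cons p cur ih =>
    intro junk fuel visited hc h
    cases fuel with
    | zero => simp at h
    | succ f =>
      simp only [List.map_cons]
      rw [loopA]
      simp only [dequeue]
      rw [if_neg (by omega : ¬ d > 1000000)]
      by_cases hpK : p = K
      · rw [if_pos hpK, if_pos (by omega : d < 1000000)]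
        rw [foundA_rest K d cur junk f _ 1 (by simp at h ⊢; omega)]
        simp only [Prod.mk.injEq, true_and]
        rw [hpK, List.count_cons_self]
        push_cast; ring
      · rw [if_neg hpK]
        rw [nextsA_eq_map,
          show ((nextsB (visited.insert p) p).map (fun v => (v, d + 1))).reverse
              ++ ((junk.map (fun r => (r, d + 1))).reverse)
            = (((junk ++ nextsB (visited.insert p) p).map (fun r => (r, d + 1))).reverse) by
            rw [List.map_append, List.reverse_append]]
        rw [ih (junk ++ nextsB (visited.insert p) p) f _
          (by rwa [List.count_cons_of_ne (fun hc' => hpK hc')] at hc)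
          (by have h3 := length_nextsB_le (visited.insert p) p
              simp only [List.length_append, List.length_cons] at h ⊢; omega)]
        rw [List.count_cons_of_ne (fun hc' => hpK hc')]

-- one full K-free level of A is exactly one expandB step of B
theorem levelA (K d : Int) (hd0 : 0 ≤ d) (hd : d < 1000000) :
    ∀ (cur : List Int), ∀ (fuel : Nat) (nxt0 : List Int) (visited : Std.TreeSet Int),
    cur.count K = 0 → cur.length ≤ fuel →
    loopA K fuel (cur.map (fun p => (p, d))) ((nxt0.map (fun r => (r, d + 1))).reverse) visited 1000000 0
      = loopA K (fuel - cur.length)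
          ((nxt0 ++ (expandB cur visited).1).map (fun r => (r, d + 1))) []
          (expandB cur visited).2 1000000 0 := by
  intro cur
  induction cur with
  | nil =>
    intro fuel nxt0 visited _ _
    simp only [List.map_nil]
    rw [loopA_flip, List.reverse_reverse]
    simp [expandB]
  | cons p cur ih =>
    intro fuel nxt0 visited hc h
    have hpK : p ≠ K := by
      intro hpk; rw [hpk, List.count_cons_self] at hc; omega
    have hcc : cur.count K = 0 := by
      rw [List.count_cons_of_ne (fun hc' => hpK hc')] at hc; exact hc
    cases fuel with
    | zero => simp at h
    | succ f =>
      simp only [List.map_cons]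
      rw [loopA]
      simp only [dequeue]
      rw [if_neg (by omega : ¬ d > 1000000), if_neg hpK]
      rw [nextsA_eq_map,
        show ((nextsB (visited.insert p) p).map (fun v => (v, d + 1))).reverse
            ++ ((nxt0.map (fun r => (r, d + 1))).reverse)
          = (((nxt0 ++ nextsB (visited.insert p) p).map (fun r => (r, d + 1))).reverse) by
          rw [List.map_append, List.reverse_append]]
      rw [ih f (nxt0 ++ nextsB (visited.insert p) p) (visited.insert p) hcc
        (by simp at h; omega)]
      rw [expandB_cons]
      simp only [List.length_cons, Nat.succ_sub_succ]
      rw [List.append_assoc]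

-- the level-boundary bisimulation between A's loop and B's loop
theorem mainA (N K : Int) :
    ∀ (fuelB : Nat) (cur : List Int) (visited : Std.TreeSet Int) (d : Int) (fuelA : Nat),
    (∀ p ∈ cur, InvEnt visited d p) →
    (∀ x ∈ visited, x ∈ SL N) → (∀ p ∈ cur, p ∈ SL N) → 0 ≤ d →
    cur.length * 4 ^ (100010 - d.toNat) ≤ fuelA → 100006 ≤ fuelB + d.toNat →
    loopA K fuelA (cur.map (fun p => (p, d))) [] visited 1000000 0 = loopB K fuelB cur visited d := by
  intro fuelB
  induction fuelB with
  | zero =>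
    intro cur visited d fuelA hinv hvs hcs hd0 hfa hfb
    match cur with
    | [] => cases fuelA <;> simp [loopA, loopB, dequeue]
    | p :: cur =>
      exfalso
      have hlen := lenV_le N visited hvs
      have hp := hinv p List.mem_cons_self
      have hdb : d ≤ (visited.size : Int) + 1 := by
        by_cases hm : p ∈ visited
        · have := hp.1 hm; omega
        · exact hp.2 hm
      omega
  | succ fB ih =>
    intro cur visited d fuelA hinv hvs hcs hd0 hfa hfb
    match cur with
    | [] => cases fuelA <;> simp [loopA, loopB, dequeue]
    | p :: cur =>
      have hlen := lenV_le N visited hvs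
      have hp := hinv p List.mem_cons_self
      have hdb : d ≤ 100003 := by
        by_cases hm : p ∈ visited
        · have := hp.1 hm; omega
        · have := hp.2 hm; omega
      have hdn : d.toNat ≤ 100003 := by omega
      have h41 : 1 ≤ 4 ^ (100010 - d.toNat) := Nat.one_le_pow _ _ (by omega)
      have h44 : 4 ≤ 4 ^ (100010 - d.toNat) := by
        calc 4 = 4 ^ 1 := by norm_num
        _ ≤ 4 ^ (100010 - d.toNat) := Nat.pow_le_pow_right (by omega) (by omega)
      by_cases hc : (p :: cur).count K = 0
      · -- no K in this level: step both loops one level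
        have hstep := levelA K d hd0 (by omega) (p :: cur) fuelA [] visited hc
          (le_trans (Nat.le_mul_of_pos_right _ (by omega)) hfa)
        simp only [List.map_nil, List.reverse_nil, List.nil_append] at hstep
        rw [hstep]
        have hcint : ((PySem.List.count (p :: cur) K : Int)) = 0 := by
          rw [PySem.List.count_eq]; exact_mod_cast congrArg Nat.cast hc
        rw [loopB]
        simp only [hcint, ne_eq, not_true_eq_false, if_false]
        obtain ⟨j1, j2⟩ := expandB_inv N d (p :: cur) visited hinv hvs hcs
        have hfa' : (expandB (p :: cur) visited).1.length * 4 ^ (100010 - (d + 1).toNat)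
            ≤ fuelA - (p :: cur).length := by
          have hE := length_expandB (p :: cur) visited
          have hm : 100010 - (d + 1).toNat = (100010 - d.toNat) - 1 := by omega
          set m := (100010 - d.toNat) - 1 with hmdef
          have h4e : 4 ^ (100010 - d.toNat) = 4 * 4 ^ m := by
            rw [hmdef, ← pow_succ']
            congr 1
            omega
          have hA : (p :: cur).length * 4 ^ (100010 - d.toNat)
              = 4 * ((p :: cur).length * 4 ^ m) := by rw [h4e]; ring
          have hB : (expandB (p :: cur) visited).1.length * 4 ^ m
              ≤ 3 * ((p :: cur).length * 4 ^ m) := by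
            calc (expandB (p :: cur) visited).1.length * 4 ^ m
                ≤ (3 * (p :: cur).length) * 4 ^ m := Nat.mul_le_mul_right _ hE
              _ = 3 * ((p :: cur).length * 4 ^ m) := by ring
          have hC : (p :: cur).length ≤ (p :: cur).length * 4 ^ m :=
            Nat.le_mul_of_pos_right _ (Nat.pos_of_ne_zero (by positivity))
          rw [hm]
          omega
        exact ih (expandB (p :: cur) visited).1 (expandB (p :: cur) visited).2 (d + 1)
          (fuelA - (p :: cur).length) j1 j2
          (fun r hr => mem_SL r (mem_expandB_fst _ _ _ hr).1 (mem_expandB_fst _ _ _ hr).2 N)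
          (by omega) hfa' (by omega)
      · -- K is in this level
        have hcpos : 0 < (p :: cur).count K := Nat.pos_of_ne_zero hc
        rw [show ([] : List (Int × Int))
              = (([] : List Int).map (fun r => (r, d + 1))).reverse by simp]
        rw [foundA K d hd0 (by omega) (p :: cur) [] fuelA visited hcpos
          (by have hx : 4 * (p :: cur).length ≤ fuelA :=
                le_trans (by rw [mul_comm]; exact Nat.mul_le_mul_left _ h44) hfa
              simpa using hx)]
        rw [loopB]
        have hcint : ((PySem.List.count (p :: cur) K : Int)) ≠ 0 := by
          rw [PySem.List.count_eq]
          exact_mod_cast fun hz => hc (by exact_mod_cast hz)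
        rw [if_pos hcint, PySem.List.count_eq]

-- ===== VERDICT (by name: the statement is the Claim_ definition above) =====
theorem bfs_spec : Claim_equal_bfs := by
  intro N K _
  unfold Spec_bfs bfs bfs_alt
  have h := mainA N K 100010 [N] Std.TreeSet.empty 0 (4 ^ 100010)
    (by intro p hp
        simp only [List.mem_singleton] at hp
        subst hp
        exact ⟨fun h => by simp at h, fun _ => by simp⟩)
    (by intro x hx; simp at hx)
    (by intro p hp; simp only [List.mem_singleton] at hp; subst hp; exact List.mem_cons_self)
    (by norm_num)
    (by simp)
    (by norm_num)
  simpa using h
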